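-- pv_equiv track=rewrite | github.com/wjdwwidz/Algorithm | 프로그래머스/2/42586. 기능개발/기능개발.py | solution
-- ===== SOURCE A (Python) =====
-- def solution(progresses, speeds):
--     # 1. 작업 완료되는 일수들 계산하여 list
--     dues = []
--     answer = []
--     for p, s in zip(progresses, speeds):
--         i = 0
--         while(p<100):
--             p +=s
--             i +=1
--         dues.append(i)
--
--     # 2. idx로 반복문 돌리는데,val(idx)가 = d보다 작은 것 까지 sum ++
--     first = dues[0]
--     sum = 0
--     for d in dues :
--         #만약 뒤에 처리할 수 있는 게 있으면 거기까지 sum에 더함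
--         if first >= d : sum +=1
--         else : #처리할 수 있는 게 없으면 d를 새로운 처음으로 설정, 여태까지 모은 sum을 append, sum 1개로 초기화
--             first = d
--             answer.append(sum)
--             sum = 1
--     # 3. sum ++ 를 기록 (new_list에 담기)
--     answer.append(sum)
--     return answer
-- ===== SOURCE B (Python) =====
-- def solution(progresses, speeds):
--     # one pass: closed-form ceiling division for the days, grow the last group
--     # while the day count does not exceed the current blocking task's day count
--     releases = []
--     blocking = None
--     for p, s in zip(progresses, speeds):
--         d = 0 if p >= 100 else -((p - 100) // s)
--         if blocking is None or d > blocking: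
--             blocking = d
--             releases.append(1)
--         else:
--             releases[-1] += 1
--     return releases
-- ===== Notes on version B (the rewrite author's own statement) =====
-- stated objective: faster
-- what changed: B replaces the per-task while-loop by a closed-form ceiling division and fuses the two phases into one pass that increments the last group in place; intended as faster (per-task O(1) instead of a day-by-day loop; a timing run saw A time out at n=16 where B returned, but could not measure a clean ratio).
import Mathlib
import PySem

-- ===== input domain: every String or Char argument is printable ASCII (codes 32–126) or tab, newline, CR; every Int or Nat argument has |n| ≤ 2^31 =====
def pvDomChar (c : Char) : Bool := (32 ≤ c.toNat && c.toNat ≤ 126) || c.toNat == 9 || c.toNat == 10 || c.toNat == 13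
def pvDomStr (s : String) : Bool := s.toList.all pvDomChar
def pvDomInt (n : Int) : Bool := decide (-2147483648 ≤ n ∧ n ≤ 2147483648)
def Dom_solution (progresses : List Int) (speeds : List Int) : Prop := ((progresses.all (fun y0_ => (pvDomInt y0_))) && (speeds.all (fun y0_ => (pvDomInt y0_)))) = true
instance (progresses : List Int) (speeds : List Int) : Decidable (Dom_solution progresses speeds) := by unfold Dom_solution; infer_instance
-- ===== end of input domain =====

-- B replaces A's per-task while-loop by a closed-form ceiling division and fuses the
-- two phases into one pass; intended as faster (measured: A timed out where B returned,
-- no clean ratio obtained).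

-- ===== PORT A =====
-- inner 'while p < 100: p += s; i += 1'; the '1 ≤ s' test is only a totality
-- guard: Python diverges when p < 100 and s ≤ 0 (excluded by Pre_solution)
def pvWhileA (p s i : Int) : Int :=
  if _h : p < 100 then
    if _hs : 1 ≤ s then pvWhileA (p + s) s (i + 1) else i
  else i
termination_by (100 - p).toNat
decreasing_by omega

def pvStepA (st : Int × Int × List Int) (d : Int) : Int × Int × List Int :=
  if st.1 ≥ d then (st.1, st.2.1 + 1, st.2.2)
  else (d, 1, st.2.2 ++ [st.2.1])

def solution (progresses : List Int) (speeds : List Int) : List Int :=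
  let dues := (progresses.zip speeds).map (fun ps => pvWhileA ps.1 ps.2 0)
  let first := dues.headD 0   -- Python raises IndexError on [] (outside Pre_solution)
  let st := dues.foldl pvStepA (first, 0, [])
  st.2.2 ++ [st.2.1]

-- ===== PORT B =====
def pvDays (p s : Int) : Int := if p ≥ 100 then 0 else -(PySem.Int.floordiv (p - 100) s)

-- 'releases[-1] += 1'
def pvBump : List Int → List Int
  | [] => []
  | [x] => [x + 1]
  | x :: y :: rest => x :: pvBump (y :: rest)

def pvStepB (acc : Option Int × List Int) (d : Int) : Option Int × List Int :=
  match acc.1 with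
  | none => (some d, acc.2 ++ [1])
  | some m => if d > m then (some d, acc.2 ++ [1]) else (some m, pvBump acc.2)

def solution_alt (progresses : List Int) (speeds : List Int) : List Int :=
  ((progresses.zip speeds).foldl
    (fun acc ps => pvStepB acc (pvDays ps.1 ps.2)) (none, [])).2

-- ===== PRECONDITION & SPEC =====
-- Pre_ excludes the empty lists, on which A raises IndexError at dues[0], and any
-- task with progress < 100 and speed ≤ 0, on which A's while-loop never terminates.
def Pre_solution (progresses : List Int) (speeds : List Int) : Prop :=
  progresses ≠ [] ∧ speeds ≠ [] ∧
  ∀ ps ∈ progresses.zip speeds, 100 ≤ ps.1 ∨ 1 ≤ ps.2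
instance (progresses : List Int) (speeds : List Int) : Decidable (Pre_solution progresses speeds) := by unfold Pre_solution; infer_instance

def pvWitness_solution : List Int × List Int := ([93, 30, 55], [1, 30, 5])

def Spec_solution (progresses : List Int) (speeds : List Int) (out : List Int) : Prop := out = solution_alt progresses speeds
instance (progresses : List Int) (speeds : List Int) (out : List Int) : Decidable (Spec_solution progresses speeds out) := by unfold Spec_solution; infer_instance

-- ===== CLAIM (what is proved, stated in full; the proofs are below) =====
def Claim_equal_solution : Prop := ∀ (progresses : List Int) (speeds : List Int), Dom_solution progresses speeds → Pre_solution progresses speeds → Spec_solution progresses speeds (solution progresses speeds)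
-- ===== LEMMAS AND PROOFS =====

-- one inner-loop step shifts the closed form by one day
theorem pvDays_step (p s : Int) (hp : p < 100) (hs : 1 ≤ s) :
    pvDays p s = 1 + pvDays (p + s) s := by
  unfold pvDays
  by_cases h : 100 ≤ p + s
  · have hq : PySem.Int.floordiv (p - 100) s = -1 := by
      rw [PySem.Int.floordiv_eq_iff_of_pos (by omega)]
      constructor <;> nlinarith
    simp [hq, h, if_neg (by omega : ¬ 100 ≤ p)]
  · have hq2 := (PySem.Int.floordiv_eq_iff_of_pos (a := p + s - 100) (b := s)
      (q := PySem.Int.floordiv (p + s - 100) s) (by omega)).mp rfl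
    have hq : PySem.Int.floordiv (p - 100) s = PySem.Int.floordiv (p + s - 100) s - 1 := by
      rw [PySem.Int.floordiv_eq_iff_of_pos (by omega)]
      constructor <;> nlinarith [hq2.1, hq2.2]
    simp only [if_neg (by omega : ¬ 100 ≤ p), if_neg h, hq]
    ring

theorem pvWhileA_pos (s : Int) (hs : 1 ≤ s) (p i : Int) :
    pvWhileA p s i = i + pvDays p s := by
  induction p, i using pvWhileA.induct (s := s) with
  | case1 p i hp hs' ih =>
    rw [pvWhileA, dif_pos hp, dif_pos hs', ih, pvDays_step p s hp hs']
    ring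
  | case2 p i hp hs' => exact absurd hs hs'
  | case3 p i hp =>
    rw [pvWhileA, dif_neg hp]
    simp [pvDays, show (100:Int) ≤ p by omega]

theorem pvWhileA_eq (p s i : Int) (h : 100 ≤ p ∨ 1 ≤ s) :
    pvWhileA p s i = i + pvDays p s := by
  by_cases hs : 1 ≤ s
  · exact pvWhileA_pos s hs p i
  · have hp : ¬ p < 100 := by omega
    rw [pvWhileA, dif_neg hp]
    simp [pvDays, show (100:Int) ≤ p by omega]

theorem pvBump_append (a : List Int) (s : Int) : pvBump (a ++ [s]) = a ++ [s + 1] := by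
  induction a with
  | nil => simp [pvBump]
  | cons x rest ih =>
    cases rest with
    | nil => simp [pvBump]
    | cons y t => simpa [pvBump] using ih

-- the grouping invariant: B's state is (group leader, groups-so-far ++ [current count])
theorem group_eq (ds : List Int) : ∀ (f sum : Int) (ans : List Int), 1 ≤ sum →
    ds.foldl pvStepB (some f, ans ++ [sum]) =
      (some (ds.foldl pvStepA (f, sum, ans)).1,
       (ds.foldl pvStepA (f, sum, ans)).2.2 ++ [(ds.foldl pvStepA (f, sum, ans)).2.1]) ∧
    1 ≤ (ds.foldl pvStepA (f, sum, ans)).2.1 := by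
  induction ds with
  | nil => intro f sum ans hs; exact ⟨rfl, hs⟩
  | cons d ds ih =>
    intro f sum ans hs
    by_cases hfd : f ≥ d
    · have hA : pvStepA (f, sum, ans) d = (f, sum + 1, ans) := by
        simp [pvStepA, hfd]
      have hB : pvStepB (some f, ans ++ [sum]) d = (some f, ans ++ [sum + 1]) := by
        simp [pvStepB, show ¬ d > f by omega, pvBump_append]
      simpa [List.foldl, hA, hB] using ih f (sum + 1) ans (by omega)
    · have hA : pvStepA (f, sum, ans) d = (d, 1, ans ++ [sum]) := by
        simp [pvStepA, hfd]
      have hB : pvStepB (some f, ans ++ [sum]) d = (some d, (ans ++ [sum]) ++ [1]) := by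
        simp [pvStepB, show d > f by omega]
      simpa [List.foldl, hA, hB] using ih d 1 (ans ++ [sum]) (by omega)

-- ===== VERDICT (by name: the statement is the Claim_ definition above) =====
theorem solution_spec : Claim_equal_solution := by
  intro progresses speeds _hdom hpre
  obtain ⟨hp, hs, hall⟩ := hpre
  unfold Spec_solution solution solution_alt
  -- B's fold over the zip is the fold over the dues list of closed forms
  rw [show (fun (acc : Option Int × List Int) (ps : Int × Int) => pvStepB acc (pvDays ps.1 ps.2))
        = (fun acc ps => (fun a d => pvStepB a d) acc ((fun ps : Int × Int => pvDays ps.1 ps.2) ps))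
      from rfl, ← List.foldl_map]
  -- the two dues lists agree pointwise on Pre_
  have hdues : (progresses.zip speeds).map (fun ps => pvWhileA ps.1 ps.2 0)
      = (progresses.zip speeds).map (fun ps : Int × Int => pvDays ps.1 ps.2) := by
    apply List.map_congr_left
    intro ps hmem
    simpa using pvWhileA_eq ps.1 ps.2 0 (hall ps hmem)
  rw [hdues]
  -- the zip is nonempty
  obtain ⟨p0, ptl, rfl⟩ : ∃ x t, progresses = x :: t := by
    cases progresses with | nil => exact absurd rfl hp | cons a b => exact ⟨a, b, rfl⟩
  obtain ⟨s0, stl, rfl⟩ : ∃ x t, speeds = x :: t := by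
    cases speeds with | nil => exact absurd rfl hs | cons a b => exact ⟨a, b, rfl⟩
  simp only [List.zip_cons_cons, List.map_cons, List.headD_cons, List.foldl_cons]
  rw [show pvStepA (pvDays p0 s0, 0, []) (pvDays p0 s0) = (pvDays p0 s0, 1, []) by simp [pvStepA],
      show pvStepB (none, []) (pvDays p0 s0) = (some (pvDays p0 s0), [1]) by simp [pvStepB]]
  have := (group_eq ((ptl.zip stl).map (fun ps : Int × Int => pvDays ps.1 ps.2))
      (pvDays p0 s0) 1 [] (by omega)).1
  simp only [List.nil_append] at this
  rw [this]
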